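-- pv_equiv track=rewrite | github.com/Agv01/Sintaxis | Parser.py | automataFinsi
-- ===== SOURCE A (Python) =====
-- ESTADO_FINAL = "ESTADO FINAL"
--
-- ESTADO_NO_FINAL = "NO ACEPTADO"
--
-- ESTADO_TRAMPA = "EN ESTADO TRAMPA"
--
-- def automataFinsi(lexema):
--     estado = 0
--     estadoFinal = [5]
--     for caracter in lexema:
--         if estado == 0 and caracter == "f":
--             estado = 1
--         elif estado == 1 and caracter == "i":
--             estado = 2
--         elif estado == 2 and caracter == "n":
--             estado = 3
--         elif estado == 3 and caracter == "s":
--             estado = 4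
--         elif estado == 4 and caracter == "i":
--             estado = 5
--         else:
--             estado = -1
--             break
--     if estado == -1:
--         return ESTADO_TRAMPA
--     elif estado in estadoFinal:
--         return ESTADO_FINAL
--     else:
--         return ESTADO_NO_FINAL
-- ===== SOURCE B (Python) =====
-- ESTADO_FINAL = "ESTADO FINAL"
--
-- ESTADO_NO_FINAL = "NO ACEPTADO"
--
-- ESTADO_TRAMPA = "EN ESTADO TRAMPA"
--
-- def automataFinsi(lexema):
--     target = "finsi"
--     if lexema == target:
--         return ESTADO_FINAL
--     elif target.startswith(lexema):
--         return ESTADO_NO_FINAL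
--     else:
--         return ESTADO_TRAMPA
-- ===== Notes on version B (the rewrite author's own statement) =====
-- stated objective: simpler
-- what changed: Replaces the per-character DFA state loop with a direct prefix classification against the literal 'finsi': equality -> final, proper prefix -> not accepted, otherwise trap.
import Mathlib
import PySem

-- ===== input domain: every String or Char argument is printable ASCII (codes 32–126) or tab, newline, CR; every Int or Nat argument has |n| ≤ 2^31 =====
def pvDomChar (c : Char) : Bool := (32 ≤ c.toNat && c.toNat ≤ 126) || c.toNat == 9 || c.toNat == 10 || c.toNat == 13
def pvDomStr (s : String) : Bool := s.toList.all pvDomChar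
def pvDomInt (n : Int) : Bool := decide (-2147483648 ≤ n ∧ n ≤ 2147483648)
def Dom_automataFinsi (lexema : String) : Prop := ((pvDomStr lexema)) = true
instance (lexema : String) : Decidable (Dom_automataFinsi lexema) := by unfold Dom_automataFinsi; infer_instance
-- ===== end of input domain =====

-- B differs from A in structure only: A runs a per-character DFA loop, B classifies the
-- input directly against the literal "finsi" (equal / prefix / otherwise).

-- ===== PORT A =====
-- the DFA loop of A; the 'break' on the trap transition is the immediate -1 return
def pvLoopA : Int → List Char → Int
  | st, [] => st
  | st, c :: cs =>
    if st = 0 ∧ c = 'f' then pvLoopA 1 cs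
    else if st = 1 ∧ c = 'i' then pvLoopA 2 cs
    else if st = 2 ∧ c = 'n' then pvLoopA 3 cs
    else if st = 3 ∧ c = 's' then pvLoopA 4 cs
    else if st = 4 ∧ c = 'i' then pvLoopA 5 cs
    else -1

def automataFinsi (lexema : String) : String :=
  let estado := pvLoopA 0 lexema.toList
  let estadoFinal : List Int := [5]
  if estado = -1 then "EN ESTADO TRAMPA"
  else if estado ∈ estadoFinal then "ESTADO FINAL"
  else "NO ACEPTADO"

-- ===== PORT B =====
def automataFinsi_alt (lexema : String) : String :=
  if lexema = "finsi" then "ESTADO FINAL"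
  else if PySem.Str.startswith "finsi" lexema then "NO ACEPTADO"
  else "EN ESTADO TRAMPA"

-- ===== PRECONDITION & SPEC =====
def Spec_automataFinsi (lexema : String) (out : String) : Prop := out = automataFinsi_alt lexema
instance (lexema : String) (out : String) : Decidable (Spec_automataFinsi lexema out) := by unfold Spec_automataFinsi; infer_instance

-- ===== CLAIM (what is proved, stated in full; the proofs are below) =====
def Claim_equal_automataFinsi : Prop := ∀ (lexema : String), Dom_automataFinsi lexema → Spec_automataFinsi lexema (automataFinsi lexema)

-- ===== LEMMAS AND PROOFS =====

-- the suffix of "finsi" still to be matched from each live DFA state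
def pvRem : Int → List Char
  | 0 => ['f', 'i', 'n', 's', 'i']
  | 1 => ['i', 'n', 's', 'i']
  | 2 => ['n', 's', 'i']
  | 3 => ['s', 'i']
  | 4 => ['i']
  | _ => []

lemma pvLoopA_eq (cs : List Char) : ∀ st : Int,
    st = 0 ∨ st = 1 ∨ st = 2 ∨ st = 3 ∨ st = 4 ∨ st = 5 →
    pvLoopA st cs = if cs <+: pvRem st then st + cs.length else -1 := by
  induction cs with
  | nil => intro st _; simp [pvLoopA]
  | cons c cs ih =>
    intro st hst
    rcases hst with h | h | h | h | h | h <;> subst h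
    · by_cases hc : c = 'f'
      · subst hc
        simpa [pvLoopA, pvRem, List.cons_prefix_cons, add_comm, add_assoc, add_left_comm] using
          ih 1 (by omega)
      · simp [pvLoopA, pvRem, List.cons_prefix_cons, hc]
    · by_cases hc : c = 'i'
      · subst hc
        simpa [pvLoopA, pvRem, List.cons_prefix_cons, add_comm, add_assoc, add_left_comm] using
          ih 2 (by omega)
      · simp [pvLoopA, pvRem, List.cons_prefix_cons, hc]
    · by_cases hc : c = 'n'
      · subst hc
        simpa [pvLoopA, pvRem, List.cons_prefix_cons, add_comm, add_assoc, add_left_comm] using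
          ih 3 (by omega)
      · simp [pvLoopA, pvRem, List.cons_prefix_cons, hc]
    · by_cases hc : c = 's'
      · subst hc
        simpa [pvLoopA, pvRem, List.cons_prefix_cons, add_comm, add_assoc, add_left_comm] using
          ih 4 (by omega)
      · simp [pvLoopA, pvRem, List.cons_prefix_cons, hc]
    · by_cases hc : c = 'i'
      · subst hc
        simpa [pvLoopA, pvRem, List.cons_prefix_cons, add_comm, add_assoc, add_left_comm] using
          ih 5 (by omega)
      · simp [pvLoopA, pvRem, List.cons_prefix_cons, hc]
    · simp [pvLoopA, pvRem]

-- ===== VERDICT (by name: the statement is the Claim_ definition above) =====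
theorem automataFinsi_spec : Claim_equal_automataFinsi := by
  intro lexema _
  unfold Spec_automataFinsi automataFinsi automataFinsi_alt
  simp only [List.mem_cons, List.not_mem_nil, or_false, PySem.Str.startswith_eq]
  have hloop := pvLoopA_eq lexema.toList 0 (by omega)
  have hrem : pvRem 0 = "finsi".toList := by decide
  rw [hrem] at hloop
  by_cases hp : lexema.toList <+: "finsi".toList
  · by_cases heq : lexema = "finsi"
    · subst heq; decide
    · have hne' : lexema.toList ≠ "finsi".toList := fun h => heq (String.toList_inj.mp h)
      have hlen : lexema.toList.length < 5 := by
        have hle : lexema.toList.length ≤ 5 := by simpa using hp.length_le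
        rcases lt_or_eq_of_le hle with h | h
        · exact h
        · exact absurd (List.IsPrefix.eq_of_length hp (by simpa using h)) hne'
      have hsw : PySem.Chars.startswith "finsi".toList lexema.toList = true :=
        (PySem.Chars.startswith_iff _ _).mpr hp
      rw [hloop, if_pos hp, zero_add, if_neg (by omega : ¬ ((lexema.toList.length : Int) = -1)),
        if_neg (by omega : ¬ ((lexema.toList.length : Int) = 5)), if_neg heq, if_pos hsw]
  · have hne : lexema ≠ "finsi" := fun h => hp (h ▸ List.prefix_refl _)
    have hsw : ¬ PySem.Chars.startswith "finsi".toList lexema.toList = true := by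
      simpa [PySem.Chars.startswith_iff] using hp
    rw [hloop, if_neg hp, if_pos rfl, if_neg hne, if_neg hsw]
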